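-- pv_equiv track=rewrite | github.com/l3robot/superchess | examples/qtgui.py | xy2square
-- ===== SOURCE A (Python) =====
-- def xy2square(x,y):
-- 	WIDTH=45
-- 	breakpoints = [15+WIDTH*i for i in range(1,9)]
-- 	xs = ['a','b','c','d','e','f','g','h']
-- 	ys = ['8','7','6','5','4','3','2','1']
-- 	squarestr = ""
-- 	for i,bp in enumerate(breakpoints):
-- 		if x<bp:
-- 			squarestr += xs[i]
-- 			break
-- 	for i,bp in enumerate(breakpoints):
-- 		if y<bp:
-- 			squarestr += ys[i]
-- 			break
-- 	return squarestr
-- ===== SOURCE B (Python) =====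
-- def xy2square(x, y):
--     def half(v, chars):
--         idx = max((v - 15) // 45, 0)
--         return chars[idx] if idx <= 7 else ""
--     return half(x, "abcdefgh") + half(y, "87654321")
-- ===== Notes on version B (the rewrite author's own statement) =====
-- stated objective: simpler
-- what changed: Replaces the two linear scans over the breakpoint list with a direct arithmetic index (v-15)//45 clamped below at 0, indexing the file/rank string only when the index is in range.
import Mathlib
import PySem

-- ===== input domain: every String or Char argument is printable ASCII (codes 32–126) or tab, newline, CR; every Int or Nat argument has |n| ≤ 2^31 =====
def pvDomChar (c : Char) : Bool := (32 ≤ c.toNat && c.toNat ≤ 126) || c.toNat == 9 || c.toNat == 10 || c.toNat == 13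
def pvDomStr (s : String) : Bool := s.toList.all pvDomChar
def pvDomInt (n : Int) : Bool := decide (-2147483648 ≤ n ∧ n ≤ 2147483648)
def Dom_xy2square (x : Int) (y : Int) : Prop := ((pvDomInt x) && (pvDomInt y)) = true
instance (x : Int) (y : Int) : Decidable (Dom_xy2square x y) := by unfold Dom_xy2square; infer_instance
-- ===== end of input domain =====

-- B replaces A's two linear breakpoint scans by a direct clamped arithmetic index (simpler).

-- ===== PORT A =====
-- first-match scan over (breakpoint, char) pairs: append the char at the first bp with v < bp, else nothing
def pickA (v : Int) : List (Int × Char) → String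
  | [] => ""
  | (bp, c) :: rest => if v < bp then String.mk [c] else pickA v rest

def xy2square (x : Int) (y : Int) : String :=
  let breakpoints : List Int := (PySem.List.pyRange 1 9 1).map (fun i => 15 + 45 * i)
  let xs : List Char := ['a','b','c','d','e','f','g','h']
  let ys : List Char := ['8','7','6','5','4','3','2','1']
  pickA x (breakpoints.zip xs) ++ pickA y (breakpoints.zip ys)

-- ===== PORT B =====
def halfB (v : Int) (chars : String) : String :=
  let idx : Int := max (PySem.Int.floordiv (v - 15) 45) 0
  if idx ≤ 7 then
    match PySem.Str.pyGet? chars idx with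
    | some c => String.mk [c]
    | none => ""
  else ""

def xy2square_alt (x : Int) (y : Int) : String :=
  halfB x "abcdefgh" ++ halfB y "87654321"

-- ===== PRECONDITION & SPEC =====
def Spec_xy2square (x : Int) (y : Int) (out : String) : Prop := out = xy2square_alt x y
instance (x : Int) (y : Int) (out : String) : Decidable (Spec_xy2square x y out) := by unfold Spec_xy2square; infer_instance

-- ===== CLAIM (what is proved, stated in full; the proofs are below) =====
def Claim_equal_xy2square : Prop := ∀ (x : Int) (y : Int), Dom_xy2square x y → Spec_xy2square x y (xy2square x y)

-- ===== LEMMAS AND PROOFS =====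

theorem half_eq_x (v : Int) :
    pickA v ((((PySem.List.pyRange 1 9 1).map (fun i => 15 + 45 * i)).zip
      ['a','b','c','d','e','f','g','h'])) = halfB v "abcdefgh" := by
  have hdiv : PySem.Int.floordiv (v - 15) 45 = (v - 15) / 45 :=
    PySem.Int.floordiv_eq_ediv_of_pos (by omega)
  have hrange : PySem.List.pyRange 1 9 1 = [1,2,3,4,5,6,7,8] := by decide
  simp only [hrange, List.map, List.zip, List.zipWith, pickA, halfB, hdiv]
  have hcase : v < 60 ∨ (60 ≤ v ∧ v < 105) ∨ (105 ≤ v ∧ v < 150) ∨ (150 ≤ v ∧ v < 195) ∨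
      (195 ≤ v ∧ v < 240) ∨ (240 ≤ v ∧ v < 285) ∨ (285 ≤ v ∧ v < 330) ∨
      (330 ≤ v ∧ v < 375) ∨ 375 ≤ v := by omega
  rcases hcase with h|h|h|h|h|h|h|h|h
  · rw [if_pos (show v < 15 + 45 * 1 by omega)]
    rw [show max ((v - 15) / 45) 0 = 0 by omega]
    decide
  · rw [if_neg (show ¬ v < 15 + 45 * 1 by omega), if_pos (show v < 15 + 45 * 2 by omega)]
    rw [show max ((v - 15) / 45) 0 = 1 by omega]
    decide
  · rw [if_neg (show ¬ v < 15 + 45 * 1 by omega), if_neg (show ¬ v < 15 + 45 * 2 by omega), if_pos (show v < 15 + 45 * 3 by omega)]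
    rw [show max ((v - 15) / 45) 0 = 2 by omega]
    decide
  · rw [if_neg (show ¬ v < 15 + 45 * 1 by omega), if_neg (show ¬ v < 15 + 45 * 2 by omega), if_neg (show ¬ v < 15 + 45 * 3 by omega), if_pos (show v < 15 + 45 * 4 by omega)]
    rw [show max ((v - 15) / 45) 0 = 3 by omega]
    decide
  · rw [if_neg (show ¬ v < 15 + 45 * 1 by omega), if_neg (show ¬ v < 15 + 45 * 2 by omega), if_neg (show ¬ v < 15 + 45 * 3 by omega), if_neg (show ¬ v < 15 + 45 * 4 by omega), if_pos (show v < 15 + 45 * 5 by omega)]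
    rw [show max ((v - 15) / 45) 0 = 4 by omega]
    decide
  · rw [if_neg (show ¬ v < 15 + 45 * 1 by omega), if_neg (show ¬ v < 15 + 45 * 2 by omega), if_neg (show ¬ v < 15 + 45 * 3 by omega), if_neg (show ¬ v < 15 + 45 * 4 by omega), if_neg (show ¬ v < 15 + 45 * 5 by omega), if_pos (show v < 15 + 45 * 6 by omega)]
    rw [show max ((v - 15) / 45) 0 = 5 by omega]
    decide
  · rw [if_neg (show ¬ v < 15 + 45 * 1 by omega), if_neg (show ¬ v < 15 + 45 * 2 by omega), if_neg (show ¬ v < 15 + 45 * 3 by omega), if_neg (show ¬ v < 15 + 45 * 4 by omega), if_neg (show ¬ v < 15 + 45 * 5 by omega), if_neg (show ¬ v < 15 + 45 * 6 by omega), if_pos (show v < 15 + 45 * 7 by omega)]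
    rw [show max ((v - 15) / 45) 0 = 6 by omega]
    decide
  · rw [if_neg (show ¬ v < 15 + 45 * 1 by omega), if_neg (show ¬ v < 15 + 45 * 2 by omega), if_neg (show ¬ v < 15 + 45 * 3 by omega), if_neg (show ¬ v < 15 + 45 * 4 by omega), if_neg (show ¬ v < 15 + 45 * 5 by omega), if_neg (show ¬ v < 15 + 45 * 6 by omega), if_neg (show ¬ v < 15 + 45 * 7 by omega), if_pos (show v < 15 + 45 * 8 by omega)]
    rw [show max ((v - 15) / 45) 0 = 7 by omega]
    decide
  · rw [if_neg (show ¬ v < 15 + 45 * 1 by omega), if_neg (show ¬ v < 15 + 45 * 2 by omega), if_neg (show ¬ v < 15 + 45 * 3 by omega), if_neg (show ¬ v < 15 + 45 * 4 by omega), if_neg (show ¬ v < 15 + 45 * 5 by omega), if_neg (show ¬ v < 15 + 45 * 6 by omega), if_neg (show ¬ v < 15 + 45 * 7 by omega), if_neg (show ¬ v < 15 + 45 * 8 by omega)]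
    rw [if_neg (show ¬ (max ((v - 15) / 45) 0 ≤ 7) by omega)]

theorem half_eq_y (v : Int) :
    pickA v ((((PySem.List.pyRange 1 9 1).map (fun i => 15 + 45 * i)).zip
      ['8','7','6','5','4','3','2','1'])) = halfB v "87654321" := by
  have hdiv : PySem.Int.floordiv (v - 15) 45 = (v - 15) / 45 :=
    PySem.Int.floordiv_eq_ediv_of_pos (by omega)
  have hrange : PySem.List.pyRange 1 9 1 = [1,2,3,4,5,6,7,8] := by decide
  simp only [hrange, List.map, List.zip, List.zipWith, pickA, halfB, hdiv]
  have hcase : v < 60 ∨ (60 ≤ v ∧ v < 105) ∨ (105 ≤ v ∧ v < 150) ∨ (150 ≤ v ∧ v < 195) ∨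
      (195 ≤ v ∧ v < 240) ∨ (240 ≤ v ∧ v < 285) ∨ (285 ≤ v ∧ v < 330) ∨
      (330 ≤ v ∧ v < 375) ∨ 375 ≤ v := by omega
  rcases hcase with h|h|h|h|h|h|h|h|h
  · rw [if_pos (show v < 15 + 45 * 1 by omega)]
    rw [show max ((v - 15) / 45) 0 = 0 by omega]
    decide
  · rw [if_neg (show ¬ v < 15 + 45 * 1 by omega), if_pos (show v < 15 + 45 * 2 by omega)]
    rw [show max ((v - 15) / 45) 0 = 1 by omega]
    decide
  · rw [if_neg (show ¬ v < 15 + 45 * 1 by omega), if_neg (show ¬ v < 15 + 45 * 2 by omega), if_pos (show v < 15 + 45 * 3 by omega)]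
    rw [show max ((v - 15) / 45) 0 = 2 by omega]
    decide
  · rw [if_neg (show ¬ v < 15 + 45 * 1 by omega), if_neg (show ¬ v < 15 + 45 * 2 by omega), if_neg (show ¬ v < 15 + 45 * 3 by omega), if_pos (show v < 15 + 45 * 4 by omega)]
    rw [show max ((v - 15) / 45) 0 = 3 by omega]
    decide
  · rw [if_neg (show ¬ v < 15 + 45 * 1 by omega), if_neg (show ¬ v < 15 + 45 * 2 by omega), if_neg (show ¬ v < 15 + 45 * 3 by omega), if_neg (show ¬ v < 15 + 45 * 4 by omega), if_pos (show v < 15 + 45 * 5 by omega)]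
    rw [show max ((v - 15) / 45) 0 = 4 by omega]
    decide
  · rw [if_neg (show ¬ v < 15 + 45 * 1 by omega), if_neg (show ¬ v < 15 + 45 * 2 by omega), if_neg (show ¬ v < 15 + 45 * 3 by omega), if_neg (show ¬ v < 15 + 45 * 4 by omega), if_neg (show ¬ v < 15 + 45 * 5 by omega), if_pos (show v < 15 + 45 * 6 by omega)]
    rw [show max ((v - 15) / 45) 0 = 5 by omega]
    decide
  · rw [if_neg (show ¬ v < 15 + 45 * 1 by omega), if_neg (show ¬ v < 15 + 45 * 2 by omega), if_neg (show ¬ v < 15 + 45 * 3 by omega), if_neg (show ¬ v < 15 + 45 * 4 by omega), if_neg (show ¬ v < 15 + 45 * 5 by omega), if_neg (show ¬ v < 15 + 45 * 6 by omega), if_pos (show v < 15 + 45 * 7 by omega)]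
    rw [show max ((v - 15) / 45) 0 = 6 by omega]
    decide
  · rw [if_neg (show ¬ v < 15 + 45 * 1 by omega), if_neg (show ¬ v < 15 + 45 * 2 by omega), if_neg (show ¬ v < 15 + 45 * 3 by omega), if_neg (show ¬ v < 15 + 45 * 4 by omega), if_neg (show ¬ v < 15 + 45 * 5 by omega), if_neg (show ¬ v < 15 + 45 * 6 by omega), if_neg (show ¬ v < 15 + 45 * 7 by omega), if_pos (show v < 15 + 45 * 8 by omega)]
    rw [show max ((v - 15) / 45) 0 = 7 by omega]
    decide
  · rw [if_neg (show ¬ v < 15 + 45 * 1 by omega), if_neg (show ¬ v < 15 + 45 * 2 by omega), if_neg (show ¬ v < 15 + 45 * 3 by omega), if_neg (show ¬ v < 15 + 45 * 4 by omega), if_neg (show ¬ v < 15 + 45 * 5 by omega), if_neg (show ¬ v < 15 + 45 * 6 by omega), if_neg (show ¬ v < 15 + 45 * 7 by omega), if_neg (show ¬ v < 15 + 45 * 8 by omega)]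
    rw [if_neg (show ¬ (max ((v - 15) / 45) 0 ≤ 7) by omega)]

-- ===== VERDICT (by name: the statement is the Claim_ definition above) =====
theorem xy2square_spec : Claim_equal_xy2square := by
  intro x y _
  unfold Spec_xy2square xy2square xy2square_alt
  show pickA x ((((PySem.List.pyRange 1 9 1).map (fun i => 15 + 45 * i)).zip
      ['a','b','c','d','e','f','g','h'])) ++
    pickA y ((((PySem.List.pyRange 1 9 1).map (fun i => 15 + 45 * i)).zip
      ['8','7','6','5','4','3','2','1'])) = halfB x "abcdefgh" ++ halfB y "87654321"
  rw [half_eq_x x, half_eq_y y]
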